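-- pv_equiv track=rewrite | github.com/liupengsay/PyIsTheBestLang | src/basis/brute_force/problem.py | lc_2170
-- ===== SOURCE A (Python) =====
-- from collections import defaultdict, deque, Counter
-- from typing import List
--
-- def lc_2170(nums: List[int]) -> int:
--     """
--     url: https://leetcode.cn/problems/minimum-operations-to-make-the-array-alternating/
--     tag: brute_force|secondary_maximum
--     """
--     odd = defaultdict(int)
--     even = defaultdict(int)
--     n = len(nums)
--     odd_cnt = 0
--     even_cnt = 0
--     for i in range(n):
--         if i % 2 == 0:
--             even[nums[i]] += 1
--             even_cnt += 1
--         else: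
--             odd[nums[i]] += 1
--             odd_cnt += 1
--
--     a = b = 0
--     for num in even:
--         if even[num] >= a:
--             a, b = even[num], a
--         elif even[num] >= b:
--             b = even[num]
--
--     ans = odd_cnt + even_cnt - a
--     for num in odd:
--         cur = odd_cnt - odd[num]
--         if even[num] == a:
--             x = b
--         else:
--             x = a
--         cur += even_cnt - x
--         if cur < ans:
--             ans = cur
--     return ans
-- ===== SOURCE B (Python) =====
-- from collections import Counter
--
-- def lc_2170(nums):
--     n = len(nums)
--     even = Counter(x for i, x in enumerate(nums) if i % 2 == 0)
--     odd = Counter(x for i, x in enumerate(nums) if i % 2 != 0)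
--
--     def top2(cnt):
--         v1, c1, c2 = None, 0, 0
--         for v, c in cnt.items():
--             if c >= c1:
--                 v1, c1, c2 = v, c, c1
--             elif c >= c2:
--                 c2 = c
--         return v1, c1, c2
--
--     ev, e1, e2 = top2(even)
--     ov, o1, o2 = top2(odd)
--     if ev != ov:
--         return n - (e1 + o1)
--     return n - max(e1 + o2, e2 + o1)
-- ===== Notes on version B (the rewrite author's own statement) =====
-- stated objective: simpler
-- what changed: B replaces A's interleaved index loop and asymmetric scan over the odd keys (with a frequency-equality tie test against the even side) by two parity Counters, a symmetric top-two (value, best, second-best) extraction for each side, and an O(1) closed-form combine on value identity.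
import Mathlib
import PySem

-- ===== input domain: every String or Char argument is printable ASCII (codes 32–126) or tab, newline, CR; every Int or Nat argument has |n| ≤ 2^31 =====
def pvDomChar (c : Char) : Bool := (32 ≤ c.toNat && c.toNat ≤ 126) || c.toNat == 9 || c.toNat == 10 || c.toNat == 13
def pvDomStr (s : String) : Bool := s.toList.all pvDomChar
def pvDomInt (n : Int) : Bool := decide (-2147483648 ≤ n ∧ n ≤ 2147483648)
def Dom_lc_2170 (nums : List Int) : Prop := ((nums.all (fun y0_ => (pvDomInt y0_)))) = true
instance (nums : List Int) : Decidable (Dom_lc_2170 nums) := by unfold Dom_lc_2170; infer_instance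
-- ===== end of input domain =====

-- B replaces A's interleaved build loop and asymmetric scan over the odd keys by two
-- parity counters, a symmetric top-two extraction and an O(1) combine (simpler, same O(n)).

-- ===== PORT A =====
def lc_2170 (nums : List Int) : Int :=
  let n : Int := PySem.List.len nums
  -- for i in range(n): even/odd counting dicts and counts; state = (odd, even, odd_cnt, even_cnt)
  let st :=
    (PySem.List.pyRange 0 n).foldl
      (fun (st : PySem.Dict Int Int × PySem.Dict Int Int × Int × Int) i =>
        if PySem.Int.mod i 2 = 0 then
          (st.1, (st.2.1).modify (PySem.List.pyGetD nums i 0) 0 (· + 1), st.2.2.1, st.2.2.2 + 1)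
        else
          ((st.1).modify (PySem.List.pyGetD nums i 0) 0 (· + 1), st.2.1, st.2.2.1 + 1, st.2.2.2))
      (PySem.Dict.empty, PySem.Dict.empty, 0, 0)
  let odd := st.1
  let even := st.2.1
  let odd_cnt := st.2.2.1
  let even_cnt := st.2.2.2
  -- a = b = 0; for num in even: top-two frequencies
  let ab :=
    even.keys.foldl
      (fun (ab : Int × Int) num =>
        if even.getD num 0 ≥ ab.1 then (even.getD num 0, ab.1)
        else if even.getD num 0 ≥ ab.2 then (ab.1, even.getD num 0)
        else ab)
      (0, 0)
  -- ans = odd_cnt + even_cnt - a; for num in odd: ...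
  let ans0 := odd_cnt + even_cnt - ab.1
  odd.keys.foldl
    (fun ans num =>
      let cur := odd_cnt - odd.getD num 0 +
        (even_cnt - (if even.getD num 0 = ab.1 then ab.2 else ab.1))
      if cur < ans then cur else ans)
    ans0

-- ===== PORT B =====
-- top2(cnt): (best value, best count, second-best count), defaults (None, 0, 0)
def pvTop2 (cnt : PySem.Dict Int Int) : Option Int × Int × Int :=
  cnt.items.foldl
    (fun (s : Option Int × Int × Int) vc =>
      if vc.2 ≥ s.2.1 then (some vc.1, vc.2, s.2.1)
      else if vc.2 ≥ s.2.2 then (s.1, s.2.1, vc.2)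
      else s)
    (none, 0, 0)

def lc_2170_alt (nums : List Int) : Int :=
  let n : Int := PySem.List.len nums
  let even := PySem.Dict.counter
    (((PySem.List.enumerate nums).filter (fun p => PySem.Int.mod p.1 2 == 0)).map Prod.snd)
  let odd := PySem.Dict.counter
    (((PySem.List.enumerate nums).filter (fun p => !(PySem.Int.mod p.1 2 == 0))).map Prod.snd)
  let te := pvTop2 even
  let tdo := pvTop2 odd
  if te.1 ≠ tdo.1 then n - (te.2.1 + tdo.2.1)
  else n - max (te.2.1 + tdo.2.2) (te.2.2 + tdo.2.1)

-- ===== PRECONDITION & SPEC =====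
def Spec_lc_2170 (nums : List Int) (out : Int) : Prop := out = lc_2170_alt nums
instance (nums : List Int) (out : Int) : Decidable (Spec_lc_2170 nums out) := by unfold Spec_lc_2170; infer_instance

-- ===== CLAIM (what is proved, stated in full; the proofs are below) =====
def Claim_equal_lc_2170 : Prop := ∀ (nums : List Int), Dom_lc_2170 nums → Spec_lc_2170 nums (lc_2170 nums)

-- ===== LEMMAS AND PROOFS =====

-- the step functions, named for the proofs only
def pvStepA (nums : List Int)
    (st : PySem.Dict Int Int × PySem.Dict Int Int × Int × Int) (i : Int) :
    PySem.Dict Int Int × PySem.Dict Int Int × Int × Int :=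
  if PySem.Int.mod i 2 = 0 then
    (st.1, (st.2.1).modify (PySem.List.pyGetD nums i 0) 0 (· + 1), st.2.2.1, st.2.2.2 + 1)
  else
    ((st.1).modify (PySem.List.pyGetD nums i 0) 0 (· + 1), st.2.1, st.2.2.1 + 1, st.2.2.2)

def pvStepE (st : PySem.Dict Int Int × PySem.Dict Int Int × Int × Int) (p : Int × Int) :
    PySem.Dict Int Int × PySem.Dict Int Int × Int × Int :=
  if PySem.Int.mod p.1 2 = 0 then
    (st.1, (st.2.1).modify p.2 0 (· + 1), st.2.2.1, st.2.2.2 + 1)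
  else
    ((st.1).modify p.2 0 (· + 1), st.2.1, st.2.2.1 + 1, st.2.2.2)

def pvCnt (d : PySem.Dict Int Int) (x : Int) : PySem.Dict Int Int := d.modify x 0 (· + 1)

def pvEvens (xs : List Int) (s : Int) : List Int :=
  ((PySem.List.enumerate xs s).filter (fun p => PySem.Int.mod p.1 2 == 0)).map Prod.snd

def pvOdds (xs : List Int) (s : Int) : List Int :=
  ((PySem.List.enumerate xs s).filter (fun p => !(PySem.Int.mod p.1 2 == 0))).map Prod.snd

def pvTopStep (s : Option Int × Int × Int) (vc : Int × Int) : Option Int × Int × Int :=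
  if vc.2 ≥ s.2.1 then (some vc.1, vc.2, s.2.1)
  else if vc.2 ≥ s.2.2 then (s.1, s.2.1, vc.2)
  else s

-- L1: A's index loop is the fold of pvStepE over the enumeration
lemma pv_loop_enum (nums : List Int) (init : PySem.Dict Int Int × PySem.Dict Int Int × Int × Int) :
    (PySem.List.pyRange 0 (PySem.List.len nums)).foldl (pvStepA nums) init
      = (PySem.List.enumerate nums 0).foldl pvStepE init := by
  have h1 : PySem.List.len nums = 0 + (nums.length : Int) := by
    simp [PySem.List.len]
  rw [h1, ← PySem.List.map_fst_enumerate nums 0, List.foldl_map]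
  apply PySem.List.foldl_congr_mem
  intro acc p hp
  rcases (PySem.List.mem_enumerate_iff nums 0 p).1 hp with ⟨k, hk, rfl⟩
  simp only [pvStepA, pvStepE, zero_add]
  rw [PySem.List.pyGetD_natCast, List.getD_eq_getElem _ _ hk]

-- L2: the enumeration fold builds the two parity counters and counts
lemma pv_build (xs : List Int) (s : Int) (od ev : PySem.Dict Int Int) (oc ec : Int) :
    (PySem.List.enumerate xs s).foldl pvStepE (od, ev, oc, ec)
      = ((pvOdds xs s).foldl pvCnt od, (pvEvens xs s).foldl pvCnt ev,
         oc + (pvOdds xs s).length, ec + (pvEvens xs s).length) := by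
  induction xs generalizing s od ev oc ec with
  | nil => simp [PySem.List.enumerate, pvOdds, pvEvens]
  | cons x xs ih =>
    rw [PySem.List.enumerate.eq_2]
    have hme : PySem.Int.mod s 2 = s % 2 := PySem.Int.mod_eq_emod_of_pos (by norm_num)
    by_cases h : s % 2 = 0
    · have hd2 : (2 : Int) ∣ s := by omega
      have hE : pvEvens (x :: xs) s = x :: pvEvens xs (s + 1) := by
        simp [pvEvens, h]
      have hO : pvOdds (x :: xs) s = pvOdds xs (s + 1) := by
        simp [pvOdds, h]
      simp only [List.foldl_cons, pvStepE, hme, h, if_pos]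
      rw [ih, hE, hO]
      simp only [List.foldl_cons, List.length_cons, pvCnt]
      refine Prod.ext rfl (Prod.ext rfl (Prod.ext rfl ?_))
      push_cast; ring
    · have hm1 : s % 2 = 1 := by omega
      have hd2 : ¬ (2 : Int) ∣ s := by omega
      have hE : pvEvens (x :: xs) s = pvEvens xs (s + 1) := by
        simp [pvEvens, hm1]
      have hO : pvOdds (x :: xs) s = x :: pvOdds xs (s + 1) := by
        simp [pvOdds, hm1]
      simp only [List.foldl_cons, pvStepE, hme, h, if_false]
      rw [ih, hE, hO]
      simp only [List.foldl_cons, List.length_cons, pvCnt]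
      refine Prod.ext rfl (Prod.ext rfl (Prod.ext ?_ rfl))
      push_cast; ring

-- L4: a fold over d.keys reading d.getD is the fold over d.items
lemma pv_keys_fold {β : Type} (d : PySem.Dict Int Int) (h : d.keys.Nodup)
    (F : β → Int → Int → β) (init : β) :
    d.keys.foldl (fun ac num => F ac num (d.getD num 0)) init
      = d.items.foldl (fun ac p => F ac p.1 p.2) init := by
  rw [PySem.Dict.items_eq_map_keys d h 0, List.foldl_map]

-- L5: A's pair fold is the (count, count) projection of B's triple fold
lemma pv_pair_proj (l : List (Int × Int)) (t : Option Int × Int × Int) :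
    l.foldl (fun (ab : Int × Int) p =>
        if p.2 ≥ ab.1 then (p.2, ab.1)
        else if p.2 ≥ ab.2 then (ab.1, p.2)
        else ab) t.2
      = (l.foldl pvTopStep t).2 := by
  induction l generalizing t with
  | nil => rfl
  | cons hd tl ih =>
    simp only [List.foldl_cons, pvTopStep]
    by_cases h1 : hd.2 ≥ t.2.1
    · simp only [h1, if_pos]
      exact ih (some hd.1, hd.2, t.2.1)
    · simp only [h1, if_false]
      by_cases h2 : hd.2 ≥ t.2.2
      · simp only [h2, if_pos]
        exact ih (t.1, t.2.1, hd.2)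
      · simp only [h2, if_false]
        exact ih t

-- L6: invariants of the top-two fold
lemma pv_top2_inv (l : List (Int × Int)) (hnd : (l.map Prod.fst).Nodup)
    (hpos : ∀ p ∈ l, 1 ≤ p.2) :
    (0 ≤ (l.foldl pvTopStep (none, 0, 0)).2.2 ∧
      (l.foldl pvTopStep (none, 0, 0)).2.2 ≤ (l.foldl pvTopStep (none, 0, 0)).2.1) ∧
    (∀ p ∈ l, p.2 ≤ (l.foldl pvTopStep (none, 0, 0)).2.1) ∧
    (((l.foldl pvTopStep (none, 0, 0)).1 = none ∧ (l.foldl pvTopStep (none, 0, 0)).2.1 = 0 ∧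
        (l.foldl pvTopStep (none, 0, 0)).2.2 = 0 ∧ l = []) ∨
      (∃ u, (l.foldl pvTopStep (none, 0, 0)).1 = some u ∧ (u, (l.foldl pvTopStep (none, 0, 0)).2.1) ∈ l)) ∧
    (∀ p ∈ l, some p.1 ≠ (l.foldl pvTopStep (none, 0, 0)).1 → p.2 ≤ (l.foldl pvTopStep (none, 0, 0)).2.2) ∧
    ((l.foldl pvTopStep (none, 0, 0)).2.2 = 0 ∨
      ∃ p ∈ l, some p.1 ≠ (l.foldl pvTopStep (none, 0, 0)).1 ∧ p.2 = (l.foldl pvTopStep (none, 0, 0)).2.2) := by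
  induction l using List.reverseRecOn with
  | nil => simp
  | append_singleton l p ih =>
    have hnd2 := hnd
    rw [List.map_append] at hnd2
    have h3 := List.nodup_append.1 hnd2
    have hndl : (l.map Prod.fst).Nodup := h3.1
    have hfreshm : p.1 ∉ l.map Prod.fst := fun hm => h3.2.2 p.1 hm p.1 (by simp) rfl
    have hpos' : ∀ q ∈ l, 1 ≤ q.2 := fun q hq => hpos q (List.mem_append_left _ hq)
    have hp1 : 1 ≤ p.2 := hpos p (List.mem_append_right _ List.mem_cons_self)
    obtain ⟨⟨i1, i2⟩, i3, i4, i5, i6⟩ := ih hndl hpos'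
    simp only [List.foldl_append, List.foldl_cons, List.foldl_nil] at *
    set T := l.foldl pvTopStep (none, 0, 0) with hT
    have hfresh : ∀ u m, (u, m) ∈ l → u ≠ p.1 := by
      intro u m hm he
      exact hfreshm (he ▸ List.mem_map.2 ⟨(u, m), hm, rfl⟩)
    simp only [pvTopStep]
    by_cases hb1 : p.2 ≥ T.2.1
    · simp only [hb1, if_pos]
      refine ⟨⟨?_, ?_⟩, ?_, ?_, ?_, ?_⟩
      · omega
      · trivial
      · intro q hq
        show q.2 ≤ p.2
        rcases List.mem_append.1 hq with hq | hq
        · have := i3 q hq; omega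
        · simp at hq; subst hq; omega
      · right
        exact ⟨p.1, rfl, List.mem_append_right _ (by simp)⟩
      · intro q hq hne
        show q.2 ≤ T.2.1
        rcases List.mem_append.1 hq with hq | hq
        · exact i3 q hq
        · simp at hq; subst hq; simp at hne
      · rcases i4 with ⟨_, h10, _, _⟩ | ⟨u, hu, humem⟩
        · left; show T.2.1 = 0; omega
        · right
          refine ⟨(u, T.2.1), List.mem_append_left _ humem, ?_, rfl⟩
          simp only [ne_eq, Option.some.injEq]
          exact hfresh u T.2.1 humem
    · have hlt : p.2 < T.2.1 := by omega
      obtain ⟨u, hu, humem⟩ : ∃ u, T.1 = some u ∧ (u, T.2.1) ∈ l := by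
        rcases i4 with ⟨_, h10, h20, _⟩ | h
        · omega
        · exact h
      have hup : u ≠ p.1 := hfresh u T.2.1 humem
      by_cases hb2 : p.2 ≥ T.2.2
      · simp only [hb1, hb2, if_pos, if_false]
        refine ⟨⟨?_, ?_⟩, ?_, ?_, ?_, ?_⟩
        · omega
        · omega
        · intro q hq
          show q.2 ≤ T.2.1
          rcases List.mem_append.1 hq with hq | hq
          · exact i3 q hq
          · simp at hq; subst hq; omega
        · right
          exact ⟨u, hu, List.mem_append_left _ humem⟩
        · intro q hq hne
          show q.2 ≤ p.2
          rcases List.mem_append.1 hq with hq | hq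
          · have := i5 q hq hne; omega
          · simp at hq; subst hq; omega
        · right
          refine ⟨p, List.mem_append_right _ (by simp), ?_, rfl⟩
          show some p.1 ≠ T.1
          simp only [hu, ne_eq, Option.some.injEq]
          exact fun he => hup he.symm
      · simp only [hb1, hb2, if_false]
        refine ⟨⟨i1, i2⟩, ?_, ?_, ?_, ?_⟩
        · intro q hq
          show q.2 ≤ T.2.1
          rcases List.mem_append.1 hq with hq | hq
          · exact i3 q hq
          · simp at hq; subst hq; omega
        · right
          exact ⟨u, hu, List.mem_append_left _ humem⟩
        · intro q hq hne
          show q.2 ≤ T.2.2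
          rcases List.mem_append.1 hq with hq | hq
          · exact i5 q hq hne
          · simp at hq; subst hq; omega
        · rcases i6 with h | ⟨q, hq, hne, heq⟩
          · left; exact h
          · right; exact ⟨q, List.mem_append_left _ hq, hne, heq⟩

-- L7: a running-min of (n' - g p) is n' minus the running-max of g
lemma pv_min_max (l : List (Int × Int)) (g : Int × Int → Int) (n' t : Int) :
    l.foldl (fun ans p => if n' - g p < ans then n' - g p else ans) (n' - t)
      = n' - l.foldl (fun m p => max m (g p)) t := by
  induction l generalizing t with
  | nil => rfl
  | cons hd tl ih =>
    simp only [List.foldl_cons]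
    rw [show (if n' - g hd < n' - t then n' - g hd else n' - t) = n' - max t (g hd) by
      split_ifs <;> omega]
    exact ih (max t (g hd))

-- L8: upper bound for a running max
lemma pv_max_le (l : List (Int × Int)) (f : Int × Int → Int) (init M : Int)
    (h0 : init ≤ M) (h : ∀ p ∈ l, f p ≤ M) :
    l.foldl (fun m p => max m (f p)) init ≤ M := by
  induction l generalizing init with
  | nil => exact h0
  | cons hd tl ih =>
    simp only [List.foldl_cons]
    exact ih (max init (f hd)) (max_le h0 (h hd List.mem_cons_self))
      (fun p hp => h p (List.mem_cons_of_mem _ hp))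

-- L11: in a list with nodup first components the second component is determined
lemma pv_key_uniq {l : List (Int × Int)} (hnd : (l.map Prod.fst).Nodup)
    {v a b : Int} (ha : (v, a) ∈ l) (hb : (v, b) ∈ l) : a = b := by
  induction l with
  | nil => cases ha
  | cons hd tl ih =>
    simp only [List.map_cons, List.nodup_cons] at hnd
    rcases List.mem_cons.1 ha with ha' | ha' <;> rcases List.mem_cons.1 hb with hb' | hb'
    · injection ha'.trans hb'.symm
    · subst ha'
      exact absurd (List.mem_map.2 ⟨(v, b), hb', rfl⟩) hnd.1
    · subst hb'
      exact absurd (List.mem_map.2 ⟨(v, a), ha', rfl⟩) hnd.1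
    · exact ih hnd.2 ha' hb'

-- L9: the closed-form combine
lemma pv_combine (e1 e2 o1 o2 : Int) (ev ov : Option Int) (cE : Int → Int)
    (O : List (Int × Int))
    (hEnn : 0 ≤ e2 ∧ e2 ≤ e1)
    (hE2 : ∀ v, some v ≠ ev → cE v ≤ e2)
    (hEev : ∀ u, ev = some u → cE u = e1)
    (hEnone : ev = none → e1 = 0 ∧ e2 = 0)
    (hOnn : 0 ≤ o2 ∧ o2 ≤ o1)
    (hOle : ∀ p ∈ O, p.2 ≤ o1)
    (hOnil : O = [] → ov = none ∧ o1 = 0 ∧ o2 = 0)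
    (hOv : O ≠ [] → ∃ w, ov = some w ∧ (w, o1) ∈ O)
    (hO2 : ∀ p ∈ O, some p.1 ≠ ov → p.2 ≤ o2)
    (hO5 : o2 = 0 ∨ ∃ p ∈ O, some p.1 ≠ ov ∧ p.2 = o2)
    (hOuniq : ∀ p ∈ O, some p.1 = ov → p.2 = o1) :
    O.foldl (fun m p => max m (p.2 + if cE p.1 = e1 then e2 else e1)) e1
      = if ev = ov then max (e1 + o2) (e2 + o1) else e1 + o1 := by
  obtain ⟨hle1, hlemem⟩ :=
    PySem.List.le_foldl_max_int O (fun p => p.2 + if cE p.1 = e1 then e2 else e1) e1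
  by_cases hO : O = []
  · subst hO
    obtain ⟨hov, ho1, ho2⟩ := hOnil rfl
    simp only [List.foldl_nil]
    cases hevc : ev with
    | none =>
      rw [if_pos (by rw [hov])]
      omega
    | some u =>
      rw [if_neg (by rw [hov]; simp)]
      omega
  · obtain ⟨w, hw, hwmem⟩ := hOv hO
    have hitele : ∀ v, (if cE v = e1 then e2 else e1) ≤ e1 := by
      intro v; split_ifs <;> omega
    by_cases hev : ev = ov
    · have hcEw : cE w = e1 := hEev w (hev.trans hw)
      rw [if_pos hev]
      apply le_antisymm
      · apply pv_max_le _ _ _ _ (by omega)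
        intro p hp
        by_cases hpw : some p.1 = ov
        · have hp2 : p.2 = o1 := hOuniq p hp hpw
          have hp1w : p.1 = w := Option.some.inj (hpw.trans hw)
          rw [if_pos (by rw [hp1w, hcEw])]
          omega
        · have hp2 : p.2 ≤ o2 := hO2 p hp hpw
          have := hitele p.1
          omega
      · have h1 : e2 + o1 ≤ List.foldl (fun m p => max m (p.2 + if cE p.1 = e1 then e2 else e1)) e1 O := by
          have := hlemem (w, o1) hwmem
          simp only [if_pos hcEw] at this
          omega
        have h2 : e1 + o2 ≤ List.foldl (fun m p => max m (p.2 + if cE p.1 = e1 then e2 else e1)) e1 O := by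
          rcases hO5 with ho2z | ⟨p, hp, hne, hp2⟩
          · omega
          · have hgp := hlemem p hp
            by_cases hc : cE p.1 = e1
            · have hp1w : p.1 ≠ w := fun h => hne (by rw [h, hw])
              have hsome : some p.1 ≠ ev := by
                rw [hev, hw]
                simp only [ne_eq, Option.some.injEq]
                exact hp1w
              have := hE2 p.1 hsome
              simp only [if_pos hc] at hgp
              omega
            · simp only [if_neg hc] at hgp
              omega
        omega
    · rw [if_neg hev]
      apply le_antisymm
      · apply pv_max_le _ _ _ _ (by omega)
        intro p hp
        have := hOle p hp
        have := hitele p.1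
        omega
      · have hgw := hlemem (w, o1) hwmem
        by_cases hc : cE w = e1
        · have he2 : e2 = e1 := by
            rcases hevc : ev with _ | u
            · have := hEnone hevc
              omega
            · have hu : u ≠ w := fun h => hev (by rw [hevc, h, hw])
              have hsome : some w ≠ ev := by
                rw [hevc]
                simp only [ne_eq, Option.some.injEq]
                exact fun h => hu h.symm
              have := hE2 w hsome
              omega
          simp only [if_pos hc] at hgw
          omega
        · simp only [if_neg hc] at hgw
          omega

-- assembly helpers
def pvE (nums : List Int) : PySem.Dict Int Int := PySem.Dict.counter (pvEvens nums 0)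
def pvO (nums : List Int) : PySem.Dict Int Int := PySem.Dict.counter (pvOdds nums 0)

-- the tail of port A after the build loop, as a function of the loop state
def pvRest (st : PySem.Dict Int Int × PySem.Dict Int Int × Int × Int) : Int :=
  let ab :=
    st.2.1.keys.foldl
      (fun (ab : Int × Int) num =>
        if st.2.1.getD num 0 ≥ ab.1 then (st.2.1.getD num 0, ab.1)
        else if st.2.1.getD num 0 ≥ ab.2 then (ab.1, st.2.1.getD num 0)
        else ab)
      (0, 0)
  st.1.keys.foldl
    (fun ans num =>
      if st.2.2.1 - st.1.getD num 0 +
          (st.2.2.2 - (if st.2.1.getD num 0 = ab.1 then ab.2 else ab.1)) < ans then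
        st.2.2.1 - st.1.getD num 0 +
          (st.2.2.2 - (if st.2.1.getD num 0 = ab.1 then ab.2 else ab.1))
      else ans)
    (st.2.2.1 + st.2.2.2 - ab.1)

lemma pv_len_enum (xs : List Int) (s : Int) : (PySem.List.enumerate xs s).length = xs.length := by
  induction xs generalizing s with
  | nil => simp [PySem.List.enumerate]
  | cons x xs ih => rw [PySem.List.enumerate.eq_2]; simp [ih]

lemma pv_len (nums : List Int) :
    (pvOdds nums 0).length + (pvEvens nums 0).length = nums.length := by
  have h := List.length_eq_length_filter_add
    (l := PySem.List.enumerate nums 0) (f := fun p => PySem.Int.mod p.1 2 == 0)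
  have he := pv_len_enum nums 0
  simp only [pvOdds, pvEvens, List.length_map]
  omega

lemma pv_counter_pos (xs : List Int) : ∀ p ∈ (PySem.Dict.counter xs).items, 1 ≤ p.2 := by
  intro p hp
  have hnd := PySem.Dict.nodup_keys_counter xs
  have hg := PySem.Dict.get?_of_mem_items _ hp hnd
  have hD : (PySem.Dict.counter xs).getD p.1 0 = p.2 := by
    rw [PySem.Dict.getD, hg]; rfl
  rw [PySem.Dict.getD_counter] at hD
  have hk : p.1 ∈ (PySem.Dict.counter xs).keys := PySem.Dict.mem_keys_of_mem_items _ hp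
  rw [PySem.Dict.keys_counter] at hk
  have hx : p.1 ∈ xs := (PySem.Set.mem_ofList xs p.1).1 hk
  have := List.count_pos_iff.2 hx
  omega

lemma pv_getD_some (d : PySem.Dict Int Int) {v c : Int} (h : d.get? v = some c) :
    d.getD v 0 = c := by rw [PySem.Dict.getD, h]; rfl

-- the top-two facts of a dict, phrased through getD
lemma pv_top2_dict (d : PySem.Dict Int Int) (hnd : d.keys.Nodup)
    (hpos : ∀ p ∈ d.items, 1 ≤ p.2) :
    (0 ≤ (pvTop2 d).2.2 ∧ (pvTop2 d).2.2 ≤ (pvTop2 d).2.1) ∧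
    (∀ v, some v ≠ (pvTop2 d).1 → d.getD v 0 ≤ (pvTop2 d).2.2) ∧
    (∀ u, (pvTop2 d).1 = some u → d.getD u 0 = (pvTop2 d).2.1) ∧
    ((pvTop2 d).1 = none → (pvTop2 d).2.1 = 0 ∧ (pvTop2 d).2.2 = 0) := by
  have hnd' : (d.items.map Prod.fst).Nodup := hnd
  obtain ⟨⟨i1, i2⟩, i3, i4, i5, i6⟩ := pv_top2_inv d.items hnd' hpos
  have hTd : pvTop2 d = d.items.foldl pvTopStep (none, 0, 0) := rfl
  rw [hTd]
  refine ⟨⟨i1, i2⟩, ?_, ?_, ?_⟩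
  · intro v hne
    cases h : d.get? v with
    | none =>
      rw [PySem.Dict.getD, h]
      show (0 : Int) ≤ _
      omega
    | some c =>
      rw [pv_getD_some d h]
      exact i5 (v, c) ((PySem.Dict.get?_eq_some_iff_mem_items d v c hnd).1 h) hne
  · intro u hu
    rcases i4 with ⟨h1, _, _, _⟩ | ⟨u', hu', humem⟩
    · rw [hu] at h1; cases h1
    · have : u' = u := Option.some.inj (hu'.symm.trans hu)
      subst this
      exact pv_getD_some d (PySem.Dict.get?_of_mem_items d humem hnd)
  · intro h0
    rcases i4 with ⟨_, h1, h2, _⟩ | ⟨u, hu, _⟩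
    · exact ⟨h1, h2⟩
    · rw [h0] at hu; cases hu

-- ===== VERDICT (by name: the statement is the Claim_ definition above) =====
theorem lc_2170_spec : Claim_equal_lc_2170 := by
  intro nums _
  unfold Spec_lc_2170
  -- normalise port A's build loop into the two counters
  have hst : (PySem.List.pyRange 0 (PySem.List.len nums)).foldl (pvStepA nums)
      (PySem.Dict.empty, PySem.Dict.empty, 0, 0)
      = (pvO nums, pvE nums, ((pvOdds nums 0).length : Int), ((pvEvens nums 0).length : Int)) := by
    rw [pv_loop_enum, pv_build]
    simp [pvO, pvE, PySem.Dict.counter_eq_foldl,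
      show pvCnt = (fun d x => d.modify x 0 fun x => x + 1) from rfl]
  have hA : lc_2170 nums = pvRest ((PySem.List.pyRange 0 (PySem.List.len nums)).foldl
      (pvStepA nums) (PySem.Dict.empty, PySem.Dict.empty, 0, 0)) := rfl
  have hB : lc_2170_alt nums =
      (if (pvTop2 (pvE nums)).1 ≠ (pvTop2 (pvO nums)).1 then
        PySem.List.len nums - ((pvTop2 (pvE nums)).2.1 + (pvTop2 (pvO nums)).2.1)
      else
        PySem.List.len nums - max ((pvTop2 (pvE nums)).2.1 + (pvTop2 (pvO nums)).2.2)
          ((pvTop2 (pvE nums)).2.2 + (pvTop2 (pvO nums)).2.1)) := rfl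
  rw [hA, hst, hB]
  simp only [pvRest]
  have hndE : (pvE nums).keys.Nodup := PySem.Dict.nodup_keys_counter _
  have hndO : (pvO nums).keys.Nodup := PySem.Dict.nodup_keys_counter _
  -- even: keys-fold → items-fold → projection of pvTop2
  have hk1 := pv_keys_fold (pvE nums) hndE
    (fun (ab : Int × Int) (num v : Int) =>
      if v ≥ ab.1 then (v, ab.1) else if v ≥ ab.2 then (ab.1, v) else ab) (0, 0)
  simp only [] at hk1
  rw [hk1]
  have hk2 := pv_pair_proj (pvE nums).items (none, 0, 0)
  simp only [] at hk2
  rw [hk2]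
  have hT1 : (pvE nums).items.foldl pvTopStep (none, 0, 0) = pvTop2 (pvE nums) := rfl
  rw [hT1]
  -- odd: keys-fold → items-fold
  have hk3 := pv_keys_fold (pvO nums) hndO
    (fun (ans num v : Int) =>
      if ((pvOdds nums 0).length : Int) - v +
          (((pvEvens nums 0).length : Int) -
            (if (pvE nums).getD num 0 = (pvTop2 (pvE nums)).2.1 then (pvTop2 (pvE nums)).2.2
             else (pvTop2 (pvE nums)).2.1)) < ans then
        ((pvOdds nums 0).length : Int) - v +
          (((pvEvens nums 0).length : Int) -
            (if (pvE nums).getD num 0 = (pvTop2 (pvE nums)).2.1 then (pvTop2 (pvE nums)).2.2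
             else (pvTop2 (pvE nums)).2.1))
      else ans)
    (((pvOdds nums 0).length : Int) + ((pvEvens nums 0).length : Int) - (pvTop2 (pvE nums)).2.1)
  simp only [] at hk3
  rw [hk3]
  -- rearrange the body into (n' - g p) shape
  have hcong := PySem.List.foldl_congr_mem (pvO nums).items
    (fun (ans : Int) (p : Int × Int) =>
      if ((pvOdds nums 0).length : Int) - p.2 +
          (((pvEvens nums 0).length : Int) -
            (if (pvE nums).getD p.1 0 = (pvTop2 (pvE nums)).2.1 then (pvTop2 (pvE nums)).2.2
             else (pvTop2 (pvE nums)).2.1)) < ans then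
        ((pvOdds nums 0).length : Int) - p.2 +
          (((pvEvens nums 0).length : Int) -
            (if (pvE nums).getD p.1 0 = (pvTop2 (pvE nums)).2.1 then (pvTop2 (pvE nums)).2.2
             else (pvTop2 (pvE nums)).2.1))
      else ans)
    (fun (ans : Int) (p : Int × Int) =>
      if ((pvOdds nums 0).length : Int) + ((pvEvens nums 0).length : Int) -
          (p.2 + (if (pvE nums).getD p.1 0 = (pvTop2 (pvE nums)).2.1 then (pvTop2 (pvE nums)).2.2
             else (pvTop2 (pvE nums)).2.1)) < ans then
        ((pvOdds nums 0).length : Int) + ((pvEvens nums 0).length : Int) -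
          (p.2 + (if (pvE nums).getD p.1 0 = (pvTop2 (pvE nums)).2.1 then (pvTop2 (pvE nums)).2.2
             else (pvTop2 (pvE nums)).2.1))
      else ans)
    (((pvOdds nums 0).length : Int) + ((pvEvens nums 0).length : Int) - (pvTop2 (pvE nums)).2.1)
    (by
      intro acc p hp
      have h : ((pvOdds nums 0).length : Int) - p.2 +
          (((pvEvens nums 0).length : Int) -
            (if (pvE nums).getD p.1 0 = (pvTop2 (pvE nums)).2.1 then (pvTop2 (pvE nums)).2.2
             else (pvTop2 (pvE nums)).2.1))
          = ((pvOdds nums 0).length : Int) + ((pvEvens nums 0).length : Int) -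
          (p.2 + (if (pvE nums).getD p.1 0 = (pvTop2 (pvE nums)).2.1 then (pvTop2 (pvE nums)).2.2
             else (pvTop2 (pvE nums)).2.1)) := by ring
      simp only []
      rw [h])
  rw [hcong]
  rw [pv_min_max]
  -- facts about the two top-two extractions
  obtain ⟨hEnn, hE2, hEev, hEnone⟩ := pv_top2_dict (pvE nums) hndE (pv_counter_pos _)
  have hndO' : ((pvO nums).items.map Prod.fst).Nodup := hndO
  have hTO : (pvO nums).items.foldl pvTopStep (none, 0, 0) = pvTop2 (pvO nums) := rfl
  obtain ⟨⟨o1nn, o21⟩, oI3, oI4, oI5, oI6⟩ := pv_top2_inv (pvO nums).items hndO' (pv_counter_pos _)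
  rw [hTO] at o1nn o21 oI3 oI4 oI5 oI6
  have hOnil : (pvO nums).items = [] →
      (pvTop2 (pvO nums)).1 = none ∧ (pvTop2 (pvO nums)).2.1 = 0 ∧ (pvTop2 (pvO nums)).2.2 = 0 := by
    intro h
    rw [show pvTop2 (pvO nums) = (pvO nums).items.foldl pvTopStep (none, 0, 0) from rfl, h]
    exact ⟨rfl, rfl, rfl⟩
  have hOv : (pvO nums).items ≠ [] →
      ∃ w, (pvTop2 (pvO nums)).1 = some w ∧ (w, (pvTop2 (pvO nums)).2.1) ∈ (pvO nums).items := by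
    intro h
    rcases oI4 with ⟨_, _, _, hnil⟩ | h'
    · exact absurd hnil h
    · exact h'
  have hOuniq : ∀ p ∈ (pvO nums).items, some p.1 = (pvTop2 (pvO nums)).1 →
      p.2 = (pvTop2 (pvO nums)).2.1 := by
    intro p hp hsome
    have hne : (pvO nums).items ≠ [] := by
      intro h; rw [h] at hp; cases hp
    obtain ⟨w, hw, hwmem⟩ := hOv hne
    have hp1w : p.1 = w := Option.some.inj (hsome.trans hw)
    have hmem : (w, p.2) ∈ (pvO nums).items := by
      rw [← hp1w]; exact hp
    exact pv_key_uniq hndO' hmem hwmem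
  have hc := pv_combine (pvTop2 (pvE nums)).2.1 (pvTop2 (pvE nums)).2.2
    (pvTop2 (pvO nums)).2.1 (pvTop2 (pvO nums)).2.2
    (pvTop2 (pvE nums)).1 (pvTop2 (pvO nums)).1
    (fun v => (pvE nums).getD v 0) (pvO nums).items
    hEnn hE2 hEev hEnone ⟨o1nn, o21⟩ oI3 hOnil hOv oI5 oI6 hOuniq
  simp only [] at hc
  rw [hc]
  -- final arithmetic
  have hlen : PySem.List.len nums
      = ((pvOdds nums 0).length : Int) + ((pvEvens nums 0).length : Int) := by
    have := pv_len nums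
    simp only [PySem.List.len]
    omega
  rw [hlen]
  by_cases hif : (pvTop2 (pvE nums)).1 = (pvTop2 (pvO nums)).1
  · rw [if_pos hif, if_neg (by simp [hif])]
  · rw [if_neg hif, if_pos hif]
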